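-- pv_equiv track=rewrite | github.com/DeVODKAdor/caixa-eletronico | saque.py | saque
-- ===== SOURCE A (Python) =====
-- def saque(valor):
--     if valor < 10 or valor > 600:
--         return None
--     else:
--         notas = {
--             "100": 0,
--             "50": 0,
--             "10": 0,
--             "5": 0,
--             "1": 0
--         }
--         while valor >= 100:
--             notas["100"] += 1
--             valor -= 100
--         while valor >= 50:
--             notas["50"] += 1
--             valor -= 50
--         while valor >= 10:
--             notas["10"] += 1
--             valor -= 10
--         while valor >= 5:
--             notas["5"] += 1
--             valor -= 5
--         while valor >= 1:
--             notas["1"] += 1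
--             valor -= 1
--
--         return notas
-- ===== SOURCE B (Python) =====
-- def saque(valor):
--     if valor < 10 or valor > 600:
--         return None
--     notas = {}
--     for key, den in (("100", 100), ("50", 50), ("10", 10), ("5", 5), ("1", 1)):
--         notas[key], valor = divmod(valor, den)
--     return notas
-- ===== Notes on version B (the rewrite author's own statement) =====
-- stated objective: simpler
-- what changed: Replaces the five hand-written repeated-subtraction while-loops over a pre-initialised dict by a single divmod fold over an ordered (key, denomination) table.
import Mathlib
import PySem

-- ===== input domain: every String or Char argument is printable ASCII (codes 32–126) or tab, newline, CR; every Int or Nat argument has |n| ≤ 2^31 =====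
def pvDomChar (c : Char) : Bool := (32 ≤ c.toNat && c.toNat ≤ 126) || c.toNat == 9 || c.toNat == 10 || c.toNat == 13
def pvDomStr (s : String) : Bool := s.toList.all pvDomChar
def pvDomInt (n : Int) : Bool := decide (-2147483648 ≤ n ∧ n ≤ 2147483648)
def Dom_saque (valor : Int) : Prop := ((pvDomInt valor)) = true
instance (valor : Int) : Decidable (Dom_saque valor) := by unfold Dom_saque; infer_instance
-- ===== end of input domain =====

-- B replaces A's five repeated-subtraction while-loops by one divmod fold over an ordered denomination table (simpler).


-- ===== PORT A =====
-- one 'while valor >= d: count += 1; valor -= d' loop of A, transcribed as recursion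
-- (d is a Nat with a positivity guard only for termination; every call site passes a positive literal)
def saqueWhile (valor : Int) (d : Nat) : Int × Int :=
  if h : (d : Int) ≤ valor ∧ 0 < d then
    let p := saqueWhile (valor - d) d
    (p.1 + 1, p.2)
  else
    (0, valor)
termination_by valor.toNat
decreasing_by omega

def saque (valor : Int) : Option (List (String × Int)) :=
  if valor < 10 ∨ valor > 600 then
    none
  else
    let p100 := saqueWhile valor 100
    let p50 := saqueWhile p100.2 50
    let p10 := saqueWhile p50.2 10
    let p5 := saqueWhile p10.2 5
    let p1 := saqueWhile p5.2 1
    some [("100", p100.1), ("50", p50.1), ("10", p10.1), ("5", p5.1), ("1", p1.1)]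

-- ===== PORT B =====
def saque_alt (valor : Int) : Option (List (String × Int)) :=
  if valor < 10 ∨ valor > 600 then
    none
  else
    let table : List (String × Int) := [("100", 100), ("50", 50), ("10", 10), ("5", 5), ("1", 1)]
    let st := table.foldl
      (fun (st : Int × PySem.Dict String Int) p =>
        (PySem.Int.mod st.1 p.2, st.2.insert p.1 (PySem.Int.floordiv st.1 p.2)))
      (valor, PySem.Dict.empty)
    some st.2.items

-- ===== PRECONDITION & SPEC =====
def Spec_saque (valor : Int) (out : Option (List (String × Int))) : Prop := out = saque_alt valor
instance (valor : Int) (out : Option (List (String × Int))) : Decidable (Spec_saque valor out) := by unfold Spec_saque; infer_instance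

-- ===== CLAIM (what is proved, stated in full; the proofs are below) =====
def Claim_equal_saque : Prop := ∀ (valor : Int), Dom_saque valor → Spec_saque valor (saque valor)

-- ===== LEMMAS AND PROOFS =====
-- A's while-loop computes the (quotient, remainder) pair of floor division, for nonnegative input
theorem saqueWhile_eq (valor : Int) (d : Nat) (hv : 0 ≤ valor) (hd : 0 < d) :
    saqueWhile valor d = (PySem.Int.floordiv valor d, PySem.Int.mod valor d) := by
  rw [saqueWhile]
  split
  · rename_i h
    have ih := saqueWhile_eq (valor - d) d (by omega) hd
    rw [ih]
    have hdpos : (0 : Int) < (d : Int) := by exact_mod_cast hd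
    have h1 : PySem.Int.floordiv (valor - d) d = PySem.Int.floordiv valor d - 1 := by
      rw [PySem.Int.floordiv_eq_ediv_of_pos hdpos, PySem.Int.floordiv_eq_ediv_of_pos hdpos]
      rw [show valor - (d : Int) = valor + (-1) * d by ring, Int.add_mul_ediv_right _ _ (by omega)]
      ring
    have h2 : PySem.Int.mod (valor - d) d = PySem.Int.mod valor d := by
      rw [PySem.Int.mod_eq_emod_of_pos hdpos, PySem.Int.mod_eq_emod_of_pos hdpos]
      exact Int.sub_emod_right valor d
    simp [h1, h2]
  · rename_i h
    have hdpos : (0 : Int) < (d : Int) := by exact_mod_cast hd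
    have hlt : valor < (d : Int) := by omega
    have h1 : PySem.Int.floordiv valor d = 0 := by
      rw [PySem.Int.floordiv_eq_ediv_of_pos hdpos]; exact Int.ediv_eq_zero_of_lt hv hlt
    have h2 : PySem.Int.mod valor d = valor := by
      rw [PySem.Int.mod_eq_emod_of_pos hdpos]; exact Int.emod_eq_of_lt hv hlt
    simp [h1, h2]
termination_by valor.toNat
decreasing_by omega

theorem mod_nonneg' (a : Int) (d : Nat) (hd : 0 < d) : 0 ≤ PySem.Int.mod a d :=
  PySem.Int.mod_nonneg a (by exact_mod_cast hd)

-- ===== VERDICT (by name: the statement is the Claim_ definition above) =====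
theorem saque_spec : Claim_equal_saque := by
  intro valor _
  unfold Spec_saque saque saque_alt
  split
  · rfl
  · rename_i h
    have hv : 0 ≤ valor := by omega
    simp only []
    rw [saqueWhile_eq valor 100 hv (by norm_num),
        saqueWhile_eq _ 50 (mod_nonneg' valor 100 (by norm_num)) (by norm_num),
        saqueWhile_eq _ 10 (mod_nonneg' _ 50 (by norm_num)) (by norm_num),
        saqueWhile_eq _ 5 (mod_nonneg' _ 10 (by norm_num)) (by norm_num),
        saqueWhile_eq _ 1 (mod_nonneg' _ 5 (by norm_num)) (by norm_num)]
    rfl
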